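-- pv_equiv track=rewrite | github.com/Thirumaldinish/csa0883-python-programming | day 1 qn1 - Copy.py | remove_duplicates_and_sort
-- ===== SOURCE A (Python) =====
-- def remove_duplicates_and_sort(array):
--     num_count = {}
--     for num in array:
--         if num in num_count:
--             num_count[num] += 1
--         else:
--             num_count[num] = 1
--     unique_numbers = [num for num in num_count if num_count[num] == 1]
--     unique_numbers.sort()
--
--     return unique_numbers
-- ===== SOURCE B (Python) =====
-- def remove_duplicates_and_sort(array):
--     s = sorted(array)
--     n = len(s)
--     return [s[i] for i in range(n)
--             if (i == 0 or s[i - 1] != s[i]) and (i == n - 1 or s[i] != s[i + 1])]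
-- ===== Notes on version B (the rewrite author's own statement) =====
-- stated objective: alternative
-- what changed: Replaces the hash-count/filter/sort pipeline with one sort of the whole array followed by a neighbor-comparison scan that keeps exactly the run-length-1 elements, which are already in sorted order.
import Mathlib
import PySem

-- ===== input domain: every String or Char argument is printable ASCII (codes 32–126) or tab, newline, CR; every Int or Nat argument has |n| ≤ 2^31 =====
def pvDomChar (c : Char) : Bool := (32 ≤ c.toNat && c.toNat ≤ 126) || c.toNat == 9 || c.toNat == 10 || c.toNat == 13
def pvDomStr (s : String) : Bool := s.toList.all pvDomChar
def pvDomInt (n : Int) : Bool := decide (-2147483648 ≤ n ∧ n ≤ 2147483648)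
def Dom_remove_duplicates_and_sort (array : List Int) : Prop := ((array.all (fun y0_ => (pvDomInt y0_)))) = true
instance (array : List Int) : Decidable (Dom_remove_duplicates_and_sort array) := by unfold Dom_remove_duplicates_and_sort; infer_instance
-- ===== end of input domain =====

-- B replaces A's hash-count/filter/sort pipeline by sorting the whole array once and
-- keeping the elements whose sorted neighbours on both sides differ (alternative decomposition, similar cost).


-- ===== PORT A =====
def remove_duplicates_and_sort (array : List Int) : List Int :=
  let num_count := array.foldl (fun d num =>
      if d.contains num then d.insert num (d.getD num 0 + 1) else d.insert num 1)
    (PySem.Dict.empty : PySem.Dict Int Int)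
  let unique_numbers := num_count.keys.filter (fun num => num_count.getD num 0 == 1)
  PySem.List.sorted unique_numbers (fun x => x) false

-- ===== PORT B =====
def remove_duplicates_and_sort_alt (array : List Int) : List Int :=
  let s := PySem.List.sorted array (fun x => x) false
  let n : Int := PySem.List.len s
  ((PySem.List.pyRange 0 n 1).filter (fun i =>
      (i == 0 || !(PySem.List.pyGetD s (i - 1) 0 == PySem.List.pyGetD s i 0)) &&
      (i == n - 1 || !(PySem.List.pyGetD s i 0 == PySem.List.pyGetD s (i + 1) 0)))).map
    (fun i => PySem.List.pyGetD s i 0)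

-- ===== PRECONDITION & SPEC =====
def Spec_remove_duplicates_and_sort (array : List Int) (out : List Int) : Prop := out = remove_duplicates_and_sort_alt array
instance (array : List Int) (out : List Int) : Decidable (Spec_remove_duplicates_and_sort array out) := by unfold Spec_remove_duplicates_and_sort; infer_instance

-- ===== CLAIM (what is proved, stated in full; the proofs are below) =====
def Claim_equal_remove_duplicates_and_sort : Prop := ∀ (array : List Int), Dom_remove_duplicates_and_sort array → Spec_remove_duplicates_and_sort array (remove_duplicates_and_sort array)

-- ===== LEMMAS AND PROOFS =====

-- A's counting loop builds Counter(array).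
lemma pv_countFold_eq_counter (array : List Int) :
    array.foldl (fun d num =>
        if d.contains num then d.insert num (d.getD num 0 + 1) else d.insert num 1)
      (PySem.Dict.empty : PySem.Dict Int Int) = PySem.Dict.counter array := by
  rw [← PySem.Dict.foldl_insert_getD_add_one_eq_counter]
  congr 1
  funext d num
  by_cases h : d.contains num
  · simp [h]
  · have h0 : d.getD num 0 = 0 := by
      have h2 := (PySem.Dict.get?_eq_none_iff_contains d num).2 (by simpa using h)
      simp [PySem.Dict.getD, h2]
    simp [h, h0]

-- A = sorted([v in dict | count v == 1]).
lemma pv_A_eq (array : List Int) :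
    remove_duplicates_and_sort array
      = PySem.List.sorted
          ((PySem.Set.ofList array).filter (fun num => ((array.count num : Int)) == 1))
          (fun x => x) false := by
  unfold remove_duplicates_and_sort
  dsimp only
  rw [pv_countFold_eq_counter]
  simp only [PySem.Dict.keys_counter, PySem.Dict.getD_counter]

-- count >= 2 iff two distinct positions hold the value.
lemma pv_two_le_count_iff (s : List Int) (v : Int) :
    2 ≤ s.count v ↔ ∃ p q : Nat, p < q ∧ s[p]? = some v ∧ s[q]? = some v := by
  induction s with
  | nil => simp
  | cons x t ih =>
    rw [List.count_cons]
    by_cases hx : x = v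
    · subst hx
      rw [if_pos (by simp)]
      constructor
      · intro h
        have h1 : 1 ≤ t.count x := by omega
        have hm : x ∈ t := List.one_le_count_iff.mp h1
        obtain ⟨j, hj⟩ := List.getElem?_of_mem hm
        exact ⟨0, j + 1, by omega, rfl, by simpa using hj⟩
      · rintro ⟨p, q, hpq, hp, hq⟩
        have hqt : t[q - 1]? = some x := by
          rw [List.getElem?_cons] at hq
          split at hq
          · omega
          · simpa using hq
        have hmem : x ∈ t := List.mem_of_getElem? hqt
        have := List.one_le_count_iff.mpr hmem
        omega
    · have hbe : (x == v) = false := by simpa using hx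
      rw [if_neg (by simp [hx]), Nat.add_zero]
      rw [ih]
      constructor
      · rintro ⟨p, q, hpq, hp, hq⟩
        exact ⟨p + 1, q + 1, by omega, by simpa using hp, by simpa using hq⟩
      · rintro ⟨p, q, hpq, hp, hq⟩
        have hp0 : p ≠ 0 := by
          intro h; subst h; simp at hp; exact hx hp
        refine ⟨p - 1, q - 1, by omega, ?_, ?_⟩
        · rw [List.getElem?_cons] at hp
          split at hp
          · omega
          · simpa using hp
        · rw [List.getElem?_cons] at hq
          split at hq
          · omega
          · simpa using hq

-- B keeps exactly the values occurring once in the sorted list.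
lemma pv_alt_mem' (array : List Int) (v : Int) :
    v ∈ remove_duplicates_and_sort_alt array ↔
      v ∈ (PySem.List.sorted array (fun x => x) false)
        ∧ (PySem.List.sorted array (fun x => x) false).count v = 1 := by
  unfold remove_duplicates_and_sort_alt
  dsimp only
  set s := PySem.List.sorted array (fun x => x) false with hs
  have hmono : ∀ p q : Nat, ∀ _hpq : p ≤ q, ∀ hq : q < s.length, s[p]'(by omega) ≤ s[q]'hq := by
    intro p q _hpq hq
    exact PySem.List.sorted_id_getElem_mono array _hpq hq
  rw [List.mem_map]
  constructor
  · rintro ⟨i, hi, hfv⟩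
    rw [List.mem_filter, PySem.List.mem_pyRange_one] at hi
    obtain ⟨⟨hi0, hin⟩, hg⟩ := hi
    simp only [PySem.List.len_eq] at hin hg
    simp only [Bool.and_eq_true, Bool.or_eq_true, beq_iff_eq, Bool.not_eq_true',
      beq_eq_false_iff_ne, ne_eq] at hg
    rw [PySem.List.pyGetD_eq_getElem s 0 hi0 (by omega)] at hfv
    refine ⟨hfv ▸ List.getElem_mem _, ?_⟩
    have h1 : 1 ≤ s.count v := List.one_le_count_iff.mpr (hfv ▸ List.getElem_mem _)
    by_contra hc
    have h2 : 2 ≤ s.count v := by omega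
    obtain ⟨p, q, hpq, hp, hq⟩ := (pv_two_le_count_iff s v).1 h2
    obtain ⟨hql, hqv⟩ := List.getElem?_eq_some_iff.mp hq
    obtain ⟨hpl, hpv⟩ := List.getElem?_eq_some_iff.mp hp
    by_cases hcase : i.toNat < q
    · have hk1 : i.toNat + 1 < s.length := by omega
      have ha : s[i.toNat + 1]'hk1 ≤ v := hqv ▸ hmono (i.toNat + 1) q (by omega) hql
      have hb : v ≤ s[i.toNat + 1]'hk1 := hfv ▸ hmono i.toNat (i.toNat + 1) (by omega) hk1
      have heq : s[i.toNat + 1]'hk1 = v := le_antisymm ha hb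
      rcases hg.2 with h | h
      · omega
      · apply h
        rw [PySem.List.pyGetD_eq_getElem s 0 hi0 (by omega),
            PySem.List.pyGetD_eq_getElem s 0 (by omega) (by omega)]
        have : (i + 1).toNat = i.toNat + 1 := by omega
        simp only [this, heq, hfv]
    · have hk1 : i.toNat - 1 < s.length := by omega
      have hp1 : p ≤ i.toNat - 1 := by omega
      have ha : v ≤ s[i.toNat - 1]'hk1 := hpv ▸ hmono p (i.toNat - 1) hp1 hk1
      have hb : s[i.toNat - 1]'hk1 ≤ v := hfv ▸ hmono (i.toNat - 1) i.toNat (by omega) (by omega)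
      have heq : s[i.toNat - 1]'hk1 = v := le_antisymm hb ha
      rcases hg.1 with h | h
      · omega
      · apply h
        rw [PySem.List.pyGetD_eq_getElem s 0 (by omega) (by omega),
            PySem.List.pyGetD_eq_getElem s 0 hi0 (by omega)]
        have : (i - 1).toNat = i.toNat - 1 := by omega
        simp only [this, heq, hfv]
  · rintro ⟨hmem, hcount⟩
    obtain ⟨k, hk, hkv⟩ := List.mem_iff_getElem.mp hmem
    refine ⟨(k : Int), ?_, ?_⟩
    · rw [List.mem_filter, PySem.List.mem_pyRange_one]
      refine ⟨⟨by omega, by simp [PySem.List.len_eq]; omega⟩, ?_⟩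
      simp only [PySem.List.len_eq]
      simp only [Bool.and_eq_true, Bool.or_eq_true, beq_iff_eq, Bool.not_eq_true',
        beq_eq_false_iff_ne, ne_eq]
      constructor
      · by_cases h0 : k = 0
        · left; simp [h0]
        · right
          rw [PySem.List.pyGetD_eq_getElem s 0 (by omega) (by omega),
              PySem.List.pyGetD_eq_getElem s 0 (by omega) (by omega)]
          intro heq
          have hcast : ((k : Int) - 1).toNat = k - 1 := by omega
          have hkk : ((k : Int)).toNat = k := by omega
          simp only [hcast, hkk] at heq
          have h2 : 2 ≤ s.count v := by
            apply (pv_two_le_count_iff s v).2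
            exact ⟨k - 1, k, by omega, List.getElem?_eq_some_iff.mpr ⟨by omega, by rw [← hkv, heq]⟩,
                   List.getElem?_eq_some_iff.mpr ⟨hk, hkv⟩⟩
          omega
      · by_cases hlast : k = s.length - 1
        · left; omega
        · right
          rw [PySem.List.pyGetD_eq_getElem s 0 (by omega) (by omega),
              PySem.List.pyGetD_eq_getElem s 0 (by omega) (by omega)]
          intro heq
          have hcast : ((k : Int) + 1).toNat = k + 1 := by omega
          have hkk : ((k : Int)).toNat = k := by omega
          simp only [hcast, hkk] at heq
          have h2 : 2 ≤ s.count v := by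
            apply (pv_two_le_count_iff s v).2
            exact ⟨k, k + 1, by omega, List.getElem?_eq_some_iff.mpr ⟨hk, hkv⟩,
                   List.getElem?_eq_some_iff.mpr ⟨by omega, by rw [← heq, hkv]⟩⟩
          omega
    · rw [PySem.List.pyGetD_eq_getElem s 0 (by omega) (by omega)]
      simpa using hkv

-- B's output is strictly increasing.
lemma pv_alt_pairwise (array : List Int) :
    (remove_duplicates_and_sort_alt array).Pairwise (· < ·) := by
  unfold remove_duplicates_and_sort_alt
  dsimp only
  set s := PySem.List.sorted array (fun x => x) false with hs
  have hmono : ∀ p q : Nat, ∀ _hpq : p ≤ q, ∀ hq : q < s.length, s[p]'(by omega) ≤ s[q]'hq := by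
    intro p q _hpq hq
    exact PySem.List.sorted_id_getElem_mono array _hpq hq
  rw [List.pairwise_map]
  apply List.Pairwise.imp_of_mem ?_ (List.Pairwise.filter _ (PySem.List.pairwise_lt_pyRange_one 0 (PySem.List.len s)))
  intro i j hi hj hij
  rw [List.mem_filter, PySem.List.mem_pyRange_one] at hi hj
  obtain ⟨⟨hi0, hin⟩, hgi⟩ := hi
  obtain ⟨⟨hj0, hjn⟩, hgj⟩ := hj
  simp only [PySem.List.len_eq] at hin hjn hgi
  simp only [Bool.and_eq_true, Bool.or_eq_true, beq_iff_eq, Bool.not_eq_true',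
    beq_eq_false_iff_ne, ne_eq] at hgi
  have hiq : i ≠ (s.length : Int) - 1 := by omega
  have hne : PySem.List.pyGetD s i 0 ≠ PySem.List.pyGetD s (i + 1) 0 := by
    rcases hgi.2 with h | h
    · exact absurd h hiq
    · exact h
  rw [PySem.List.pyGetD_eq_getElem s 0 hi0 (by omega), PySem.List.pyGetD_eq_getElem s 0 hj0 (by omega)]
  rw [PySem.List.pyGetD_eq_getElem s 0 hi0 (by omega), PySem.List.pyGetD_eq_getElem s 0 (by omega : (0:Int) ≤ i + 1) (by omega)] at hne
  by_contra hlt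
  have h1 : s[j.toNat]'(by omega) ≤ s[i.toNat]'(by omega) := le_of_not_gt hlt
  have h2 : s[i.toNat]'(by omega) ≤ s[(i+1).toNat]'(by omega) := hmono _ _ (by omega) _
  have h3 : s[(i+1).toNat]'(by omega) ≤ s[j.toNat]'(by omega) := hmono _ _ (by omega) _
  exact hne (le_antisymm h2 (le_trans h3 h1))

-- ===== VERDICT (by name: the statement is the Claim_ definition above) =====
theorem remove_duplicates_and_sort_spec : Claim_equal_remove_duplicates_and_sort := by
  intro array _
  unfold Spec_remove_duplicates_and_sort
  rw [pv_A_eq]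
  apply PySem.List.sorted_eq_of_perm_of_pairwise_lt
  · refine (List.perm_ext_iff_of_nodup ?_ ?_).2 ?_
    · exact (pv_alt_pairwise array).imp (fun h => ne_of_lt h)
    · exact (PySem.Set.nodup_ofList array).filter _
    · intro a
      rw [pv_alt_mem' array a, List.mem_filter, PySem.Set.mem_ofList]
      have hperm := PySem.List.sorted_perm array (fun x => x) false
      rw [hperm.mem_iff, hperm.count_eq]
      constructor
      · rintro ⟨h1, h2⟩; exact ⟨h1, by simpa using h2⟩
      · rintro ⟨h1, h2⟩; exact ⟨h1, by simpa using h2⟩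
  · exact (pv_alt_pairwise array).imp (fun h => h)
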